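-- pv_equiv track=rewrite | github.com/Caeph/paperfly | peak_calling/compare_replicate_peaks_XXX.py | merge_maps
-- ===== SOURCE A (Python) =====
-- def merge_maps(newmaps, oldmaps):
--     new_to_old = {}
--     for old_key in oldmaps:
--         old_key_ident = old_key.split("__pval")[0]
--         matches = [k for k in newmaps.keys() if old_key_ident in k]
--         for match in matches:
--             if match in new_to_old:
--                 new_to_old[match].append(old_key)
--             else:
--                 new_to_old[match] = [old_key]
--
--     result = {}
--     for item, parts in new_to_old.items():
--         seqs = []
--         for x in parts:
--             seqs.extend(oldmaps[x])
--         result[item] = seqs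
--
--
--
--     return result
-- ===== SOURCE B (Python) =====
-- def merge_maps(newmaps, oldmaps):
--     # One fused pass: append each old entry's sequences directly into the result,
--     # instead of first grouping old keys per new key and then resolving lookups.
--     result = {}
--     new_keys = list(newmaps)
--     for old_key, seqs in oldmaps.items():
--         ident = old_key.split("__pval")[0]
--         for k in new_keys:
--             if ident in k:
--                 result.setdefault(k, []).extend(seqs)
--     return result
-- ===== Notes on version B (the rewrite author's own statement) =====
-- stated objective: simpler
-- what changed: B fuses A's two passes into one: instead of first building an intermediate map from new keys to lists of matching old keys and then resolving each old key back through oldmaps, B appends each old entry's sequences directly into the result dict in a single pass, eliminating the intermediate structure and the later dict lookups.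
import Mathlib
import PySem

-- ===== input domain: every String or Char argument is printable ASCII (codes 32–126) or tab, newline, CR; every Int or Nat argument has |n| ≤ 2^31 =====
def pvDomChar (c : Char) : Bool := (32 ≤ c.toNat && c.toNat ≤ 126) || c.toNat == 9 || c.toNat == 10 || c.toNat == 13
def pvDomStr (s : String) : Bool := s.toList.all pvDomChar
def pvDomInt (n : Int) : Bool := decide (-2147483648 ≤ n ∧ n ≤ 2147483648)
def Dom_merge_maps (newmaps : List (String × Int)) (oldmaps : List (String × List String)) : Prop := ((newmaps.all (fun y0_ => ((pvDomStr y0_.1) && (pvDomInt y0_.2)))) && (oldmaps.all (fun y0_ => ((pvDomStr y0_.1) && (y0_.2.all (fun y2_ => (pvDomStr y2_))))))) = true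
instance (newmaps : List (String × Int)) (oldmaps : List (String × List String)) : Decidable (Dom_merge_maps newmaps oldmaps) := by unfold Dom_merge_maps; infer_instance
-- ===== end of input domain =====

-- B fuses A's two passes into one: it appends each old entry's sequences directly into the
-- result (no intermediate new-key → old-key map and no later dict lookups); same return value.

-- shared helper: old_key.split("__pval")[0] (split with a nonempty separator is never empty,
-- so the [0] indexing cannot raise and equals headD)
def pvIdent (s : String) : String :=
  ((PySem.Str.split? s "__pval").getD []).headD ""

-- ===== PORT A =====
def merge_maps (newmaps : List (String × Int)) (oldmaps : List (String × List String)) : List (String × List String) :=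
  let newd := PySem.Dict.ofList newmaps
  let oldd := PySem.Dict.ofList oldmaps
  let new_to_old : PySem.Dict String (List String) :=
    oldd.keys.foldl (fun nto old_key =>
      let ident := pvIdent old_key
      let matches_ := newd.keys.filter (fun k => PySem.Str.isIn ident k)
      matches_.foldl (fun nto m =>
        if nto.contains m then nto.modify m [] (fun l => l ++ [old_key])
        else nto.insert m [old_key]) nto) PySem.Dict.empty
  -- oldmaps[x]: x is always a key of oldd here, so the lookup cannot raise; getD is exact
  let result : PySem.Dict String (List String) :=
    new_to_old.items.foldl (fun res p =>
      let seqs := p.2.foldl (fun seqs x => seqs ++ oldd.getD x []) []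
      res.insert p.1 seqs) PySem.Dict.empty
  result.items

-- ===== PORT B =====
def merge_maps_alt (newmaps : List (String × Int)) (oldmaps : List (String × List String)) : List (String × List String) :=
  let new_keys := (PySem.Dict.ofList newmaps).keys
  let result : PySem.Dict String (List String) :=
    (PySem.Dict.ofList oldmaps).items.foldl (fun res p =>
      let ident := pvIdent p.1
      new_keys.foldl (fun res k =>
        if PySem.Str.isIn ident k then res.modify k [] (fun l => l ++ p.2) else res) res)
      PySem.Dict.empty
  result.items

-- ===== PRECONDITION & SPEC =====
def Spec_merge_maps (newmaps : List (String × Int)) (oldmaps : List (String × List String)) (out : List (String × List String)) : Prop := out = merge_maps_alt newmaps oldmaps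
instance (newmaps : List (String × Int)) (oldmaps : List (String × List String)) (out : List (String × List String)) : Decidable (Spec_merge_maps newmaps oldmaps out) := by unfold Spec_merge_maps; infer_instance

-- ===== CLAIM (what is proved, stated in full; the proofs are below) =====
def Claim_equal_merge_maps : Prop := ∀ (newmaps : List (String × Int)) (oldmaps : List (String × List String)), Dom_merge_maps newmaps oldmaps → Spec_merge_maps newmaps oldmaps (merge_maps newmaps oldmaps)

-- ===== LEMMAS AND PROOFS =====

-- A's per-match step is always a single insert
lemma stepA_eq_insert (nto : PySem.Dict String (List String)) (m ok : String) :
    (if nto.contains m then nto.modify m [] (fun l => l ++ [ok])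
     else nto.insert m [ok])
      = nto.insert m (if nto.contains m then nto.getD m [] ++ [ok] else [ok]) := by
  by_cases h : nto.contains m = true <;> simp [h, PySem.Dict.modify]

-- get? through a value-mapping of the items list
lemma get?_mk_map_flat (g : String → List String) (l : List (String × List String)) (k : String) :
    (PySem.Dict.mk (l.map (fun q => (q.1, q.2.flatMap g)))).get? k
      = ((PySem.Dict.mk l).get? k).map (fun v => v.flatMap g) := by
  induction l with
  | nil => simp [PySem.Dict.get?]
  | cons p t ih =>
    obtain ⟨a, v⟩ := p
    simp only [List.map_cons, PySem.Dict.get?_mk_cons]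
    by_cases h : a == k <;> simp [h, ih]

-- the running invariant: res's items are nto's items with every old-key list flattened by g
def pvRel (g : String → List String) (nto res : PySem.Dict String (List String)) : Prop :=
  res.items = nto.items.map (fun q => (q.1, q.2.flatMap g))

lemma pvRel_contains {g : String → List String} {nto res : PySem.Dict String (List String)}
    (h : pvRel g nto res) (m : String) : res.contains m = nto.contains m := by
  simp [PySem.Dict.contains, pvRel] at h ⊢
  rw [h, List.any_map]
  rfl

lemma pvRel_getD {g : String → List String} {nto res : PySem.Dict String (List String)}
    (h : pvRel g nto res) (m : String) (hc : nto.contains m = true) :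
    res.getD m [] = (nto.getD m []).flatMap g := by
  have hres : res = PySem.Dict.mk res.items := rfl
  have hnto : nto = PySem.Dict.mk nto.items := rfl
  rw [PySem.Dict.getD_eq_get?_getD, PySem.Dict.getD_eq_get?_getD]
  rw [hres, hnto, h, get?_mk_map_flat]
  rcases hg : (PySem.Dict.mk nto.items).get? m with _ | v
  · -- contradicts hc
    have := PySem.Dict.contains_eq_isSome_get? nto m
    rw [← hnto] at hg
    rw [hg] at this
    simp [hc] at this
  · simp

lemma pvRel_step {g : String → List String} {nto res : PySem.Dict String (List String)}
    (h : pvRel g nto res) (m ok : String) :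
    pvRel g (if nto.contains m then nto.modify m [] (fun l => l ++ [ok])
             else nto.insert m [ok])
            (res.modify m [] (fun l => l ++ g ok)) := by
  rw [stepA_eq_insert]
  unfold pvRel at h ⊢
  have hc := pvRel_contains h m
  by_cases hm : nto.contains m = true
  · rw [PySem.Dict.modify, PySem.Dict.items_insert_of_contains _ _ (by rw [hc]; exact hm),
        PySem.Dict.items_insert_of_contains _ _ hm, h, List.map_map, List.map_map]
    refine List.map_congr_left ?_
    intro q hq
    by_cases hq1 : q.1 == m
    · simp [hq1, Function.comp, hm, pvRel_getD h m hm]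
    · simp [Function.comp, hq1]
  · have hmf : nto.contains m = false := by simpa using hm
    have hrf : res.contains m = false := by rw [hc]; exact hmf
    have hget : res.getD m [] = [] := PySem.Dict.getD_of_not_contains _ _ hrf
    rw [PySem.Dict.modify, PySem.Dict.items_insert_of_not_contains _ _ hrf,
        PySem.Dict.items_insert_of_not_contains _ _ hmf, h, hget]
    simp [hmf]

lemma pvRel_inner (g : String → List String) (ok : String) (ms : List String)
    (nto res : PySem.Dict String (List String)) (h : pvRel g nto res) :
    pvRel g (ms.foldl (fun nto m =>
              if nto.contains m then nto.modify m [] (fun l => l ++ [ok])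
              else nto.insert m [ok]) nto)
            (ms.foldl (fun res m => res.modify m [] (fun l => l ++ g ok)) res) := by
  induction ms generalizing nto res with
  | nil => exact h
  | cons m t ih => exact ih _ _ (pvRel_step h m ok)

lemma pvRel_outer (g : String → List String) (newkeys : List String)
    (olds : List (String × List String)) (hg : ∀ p ∈ olds, p.2 = g p.1)
    (nto res : PySem.Dict String (List String)) (h : pvRel g nto res) :
    pvRel g
      (olds.foldl (fun nto p =>
        (newkeys.filter (fun k => PySem.Str.isIn (pvIdent p.1) k)).foldl (fun nto m =>
          if nto.contains m then nto.modify m [] (fun l => l ++ [p.1])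
          else nto.insert m [p.1]) nto) nto)
      (olds.foldl (fun res p =>
        newkeys.foldl (fun res k =>
          if PySem.Str.isIn (pvIdent p.1) k then res.modify k [] (fun l => l ++ p.2) else res) res) res) := by
  induction olds generalizing nto res with
  | nil => exact h
  | cons p t ih =>
    refine ih (fun q hq => hg q (List.mem_cons_of_mem _ hq)) _ _ ?_
    beta_reduce
    rw [PySem.List.foldl_if_eq_foldl_filter (fun k => PySem.Str.isIn (pvIdent p.1) k)
         (fun res k => res.modify k [] (fun l => l ++ p.2)) newkeys res,
        hg p (List.mem_cons_self)]
    exact pvRel_inner g p.1 _ nto res h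

-- keys of A's intermediate dict stay nodup
lemma nodup_nto (newkeys : List String) (olds : List String)
    (nto : PySem.Dict String (List String)) (h : nto.keys.Nodup) :
    (olds.foldl (fun nto ok =>
      (newkeys.filter (fun k => PySem.Str.isIn (pvIdent ok) k)).foldl (fun nto m =>
        if nto.contains m then nto.modify m [] (fun l => l ++ [ok])
        else nto.insert m [ok]) nto) nto).keys.Nodup := by
  induction olds generalizing nto with
  | nil => exact h
  | cons ok t ih =>
    refine ih _ ?_
    have : ∀ (ms : List String) (d : PySem.Dict String (List String)), d.keys.Nodup →
        (ms.foldl (fun nto m =>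
          if nto.contains m then nto.modify m [] (fun l => l ++ [ok])
          else nto.insert m [ok]) d).keys.Nodup := by
      intro ms
      induction ms with
      | nil => intro d hd; exact hd
      | cons m t2 ih2 =>
        intro d hd
        refine ih2 _ ?_
        beta_reduce
        rw [stepA_eq_insert]
        exact PySem.Dict.nodup_keys_insert _ _ _ hd
    exact this _ _ h

-- ===== VERDICT (by name: the statement is the Claim_ definition above) =====
theorem merge_maps_spec : Claim_equal_merge_maps := by
  intro newmaps oldmaps _
  unfold Spec_merge_maps merge_maps merge_maps_alt
  dsimp only
  set oldd := PySem.Dict.ofList oldmaps with holdd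
  set newkeys := (PySem.Dict.ofList newmaps).keys with hnk
  set g : String → List String := fun x => oldd.getD x [] with hgdef
  -- A's outer loop over keys = loop over items projected to fst
  have hkeys : oldd.keys = oldd.items.map Prod.fst := rfl
  have hfold : oldd.keys.foldl (fun nto old_key =>
      (newkeys.filter (fun k => PySem.Str.isIn (pvIdent old_key) k)).foldl (fun nto m =>
        if nto.contains m then nto.modify m [] (fun l => l ++ [old_key])
        else nto.insert m [old_key]) nto) PySem.Dict.empty
    = oldd.items.foldl (fun nto p =>
      (newkeys.filter (fun k => PySem.Str.isIn (pvIdent p.1) k)).foldl (fun nto m =>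
        if nto.contains m then nto.modify m [] (fun l => l ++ [p.1])
        else nto.insert m [p.1]) nto) PySem.Dict.empty := by
    rw [hkeys, List.foldl_map]
  -- the two final dicts are pvRel-related
  have hrel := pvRel_outer g newkeys oldd.items
    (fun p hp => (PySem.Dict.getD_of_mem_items oldd hp (PySem.Dict.nodup_keys_ofList oldmaps) []).symm)
    PySem.Dict.empty PySem.Dict.empty rfl
  have hnd : (oldd.items.foldl (fun nto p =>
      (newkeys.filter (fun k => PySem.Str.isIn (pvIdent p.1) k)).foldl (fun nto m =>
        if nto.contains m then nto.modify m [] (fun l => l ++ [p.1])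
        else nto.insert m [p.1]) nto) PySem.Dict.empty).keys.Nodup := by
    have := nodup_nto newkeys (oldd.items.map Prod.fst) PySem.Dict.empty
      PySem.Dict.nodup_keys_empty
    rwa [List.foldl_map] at this
  rw [hfold]
  set nto := oldd.items.foldl (fun nto p =>
      (newkeys.filter (fun k => PySem.Str.isIn (pvIdent p.1) k)).foldl (fun nto m =>
        if nto.contains m then nto.modify m [] (fun l => l ++ [p.1])
        else nto.insert m [p.1]) nto) PySem.Dict.empty with hntodef
  have hfresh := PySem.Dict.items_foldl_insert_fresh nto.items (fun p => p.1)
    (fun p => p.2.foldl (fun seqs x => seqs ++ oldd.getD x []) []) PySem.Dict.empty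
    (fun a _ => by simp [PySem.Dict.contains_empty]) hnd
  rw [hfresh]
  unfold pvRel at hrel
  rw [hrel]
  simp [hgdef, List.flatMap, PySem.Dict.empty]
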